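-- pv_equiv track=rewrite | github.com/codefox254/Oche180 | backend/training/xp_calculator.py | level_from_xp
-- ===== SOURCE A (Python) =====
-- def level_from_xp(total_xp):
--     """Calculate player level from total XP (progression curve)"""
--     # Level 1: 0-100 XP
--     # Level 2: 100-300 XP (200 more)
--     # Level 3: 300-600 XP (300 more)
--     # Each level needs +100 more XP
--     if total_xp < 100:
--         return 1
--
--     xp_for_next = 100
--     level = 1
--     remaining_xp = total_xp - 100
--
--     while remaining_xp > 0 and level < 100:
--         xp_for_next += 100
--         if remaining_xp >= xp_for_next:
--             remaining_xp -= xp_for_next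
--             level += 1
--         else:
--             break
--
--     return level
-- ===== SOURCE B (Python) =====
-- from math import isqrt
--
-- def level_from_xp(total_xp):
--     """Closed-form level: largest n with 50*n*(n+1) <= total_xp, clamped to [1, 100]."""
--     if total_xp < 100:
--         return 1
--     n = (isqrt(200 * total_xp + 2500) - 50) // 100
--     return min(n, 100)
-- ===== Notes on version B (the rewrite author's own statement) =====
-- stated objective: simpler
-- what changed: Replaced the level-by-level subtract-thresholds while loop by a closed-form integer-sqrt inverse of the cumulative-XP curve 50*n*(n+1), clamped to [1,100].
import Mathlib
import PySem

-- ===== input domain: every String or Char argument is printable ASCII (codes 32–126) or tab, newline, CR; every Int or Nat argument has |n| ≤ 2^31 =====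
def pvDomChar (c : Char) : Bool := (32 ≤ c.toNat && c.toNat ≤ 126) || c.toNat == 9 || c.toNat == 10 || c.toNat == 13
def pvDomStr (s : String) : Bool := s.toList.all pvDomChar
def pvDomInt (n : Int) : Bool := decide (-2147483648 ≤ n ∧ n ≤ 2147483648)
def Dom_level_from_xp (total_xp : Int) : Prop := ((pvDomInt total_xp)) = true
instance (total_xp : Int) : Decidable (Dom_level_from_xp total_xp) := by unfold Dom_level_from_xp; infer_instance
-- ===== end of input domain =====

-- B replaces A's subtract-thresholds while loop by the closed-form integer-sqrt inverse of the
-- cumulative-XP curve 50*n*(n+1), clamped to [1,100].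

-- ===== PORT A =====
-- the while loop of A, step for step; terminates because `level` is bounded by 100
def levelLoop (remaining_xp xp_for_next level : Int) : Int :=
  if remaining_xp > 0 ∧ level < 100 then
    let xp' := xp_for_next + 100
    if remaining_xp ≥ xp' then
      levelLoop (remaining_xp - xp') xp' (level + 1)
    else level
  else level
termination_by (100 - level).toNat
decreasing_by omega

def level_from_xp (total_xp : Int) : Int :=
  if total_xp < 100 then 1
  else levelLoop (total_xp - 100) 100 1

-- ===== PORT B =====
-- math.isqrt on a nonnegative int (exact there; B only calls it on nonnegative arguments)
def pyIsqrt (n : Int) : Int := (Nat.sqrt n.toNat : Int)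

def level_from_xp_alt (total_xp : Int) : Int :=
  if total_xp < 100 then 1
  else
    let n := PySem.Int.floordiv (pyIsqrt (200 * total_xp + 2500) - 50) 100
    min n 100

-- ===== PRECONDITION & SPEC =====
def Spec_level_from_xp (total_xp : Int) (out : Int) : Prop := out = level_from_xp_alt total_xp
instance (total_xp : Int) (out : Int) : Decidable (Spec_level_from_xp total_xp out) := by unfold Spec_level_from_xp; infer_instance

-- ===== CLAIM (what is proved, stated in full; the proofs are below) =====
def Claim_equal_level_from_xp : Prop := ∀ (total_xp : Int), Dom_level_from_xp total_xp → Spec_level_from_xp total_xp (level_from_xp total_xp)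

-- ===== LEMMAS AND PROOFS =====

-- shorthand (proof-side only): B's closed-form candidate level before clamping
def gLvl (x : Int) : Int := PySem.Int.floordiv (pyIsqrt (200 * x + 2500) - 50) 100

-- characterisation: for x ≥ 100 and n ≥ 0, n ≤ gLvl x ↔ 50*n*(n+1) ≤ x
theorem le_gLvl_iff (x n : Int) (hx : 100 ≤ x) (hn : 0 ≤ n) :
    n ≤ gLvl x ↔ 50 * n * (n + 1) ≤ x := by
  unfold gLvl pyIsqrt
  rw [PySem.Int.le_floordiv_iff_mul_le (by norm_num)]
  have h1 : n * 100 ≤ (Nat.sqrt (200 * x + 2500).toNat : Int) - 50 ↔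
      (n.toNat * 100 + 50 : ℕ) ≤ Nat.sqrt (200 * x + 2500).toNat := by
    constructor <;> intro h <;> omega
  rw [h1, Nat.le_sqrt]
  have h2 : ((200 * x + 2500).toNat : Int) = 200 * x + 2500 := by omega
  constructor
  · intro h
    have := (Int.ofNat_le.mpr h)
    push_cast at this
    rw [Int.toNat_of_nonneg hn] at this
    nlinarith
  · intro h
    have key : ((n.toNat * 100 + 50) * (n.toNat * 100 + 50) : Int) ≤
        ((200 * x + 2500).toNat : Int) := by
      rw [h2]
      have hnn : (n.toNat : Int) = n := Int.toNat_of_nonneg hn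
      rw [hnn]; nlinarith
    exact_mod_cast key

-- A's loop, under its invariant, computes min (gLvl x) 100
theorem loop_eq (k : ℕ) : ∀ (l x : Int), 1 ≤ l → l ≤ 100 → (100 - l).toNat = k →
    50 * l * (l + 1) ≤ x →
    levelLoop (x - 50 * l * (l + 1)) (100 * l) l = min (gLvl x) 100 := by
  induction k with
  | zero =>
    intro l x hl hu hk hle
    have hl100 : l = 100 := by omega
    subst hl100
    rw [levelLoop]
    have hx : (100 : Int) ≤ x := by nlinarith
    have hg : (100 : Int) ≤ gLvl x := by
      rw [le_gLvl_iff x 100 hx (by norm_num)]; linarith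
    rw [if_neg (show ¬ (x - 50 * 100 * (100 + 1) > 0 ∧ (100:Int) < 100) by omega)]
    omega
  | succ k ih =>
    intro l x hl hu hk hle
    have hl100 : l < 100 := by omega
    have hx : (100 : Int) ≤ x := by nlinarith
    have hgl : l ≤ gLvl x := by rw [le_gLvl_iff x l hx (by omega)]; exact hle
    rw [levelLoop]
    by_cases hr : x - 50 * l * (l + 1) > 0
    · rw [if_pos (show x - 50 * l * (l + 1) > 0 ∧ l < 100 from ⟨hr, hl100⟩)]
      by_cases hstep : x - 50 * l * (l + 1) ≥ 100 * l + 100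
      · rw [if_pos hstep]
        have harg1 : x - 50 * l * (l + 1) - (100 * l + 100) = x - 50 * (l+1) * ((l+1) + 1) := by ring
        have harg2 : (100 : Int) * l + 100 = 100 * (l + 1) := by ring
        rw [harg1, harg2]
        exact ih (l + 1) x (by omega) (by omega) (by omega) (by nlinarith)
      · rw [if_neg hstep]
        have hgu : ¬ (l + 1 ≤ gLvl x) := by
          rw [le_gLvl_iff x (l + 1) hx (by omega)]; nlinarith
        omega
    · rw [if_neg (show ¬ (x - 50 * l * (l + 1) > 0 ∧ l < 100) by tauto)]
      have hgu : ¬ (l + 1 ≤ gLvl x) := by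
        rw [le_gLvl_iff x (l + 1) hx (by omega)]; nlinarith
      omega

-- ===== VERDICT (by name: the statement is the Claim_ definition above) =====
theorem level_from_xp_spec : Claim_equal_level_from_xp := by
  intro x _
  unfold Spec_level_from_xp level_from_xp level_from_xp_alt
  by_cases hx : x < 100
  · simp [hx]
  · simp only [if_neg hx]
    have h := loop_eq 99 1 x (by omega) (by omega) (by omega) (by omega)
    norm_num at h
    simpa [gLvl] using h
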